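-- pv_equiv track=rewrite | github.com/frsauvage/aoc2025 | day12_2025.py | shape_parity
-- ===== SOURCE A (Python) =====
-- def shape_parity(shape):
--     """Return (#black, #white) for a checkerboard coloring of all '#' cells."""
--     black = white = 0
--     for y, row in enumerate(shape):
--         for x, c in enumerate(row):
--             if c == "#":
--                 if (x + y) % 2 == 0:
--                     black += 1
--                 else:
--                     white += 1
--     return black, white
-- ===== SOURCE B (Python) =====
-- def shape_parity(shape):
--     """Return (#black, #white) for a checkerboard coloring of all '#' cells."""
--     black = white = 0
--     for y, row in enumerate(shape):
--         even_hits = row[::2].count("#")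
--         odd_hits = row[1::2].count("#")
--         if y % 2 == 0:
--             black += even_hits
--             white += odd_hits
--         else:
--             black += odd_hits
--             white += even_hits
--     return black, white
-- ===== Notes on version B (the rewrite author's own statement) =====
-- stated objective: simpler
-- what changed: Replaces the per-cell (x+y)%2 branch with per-row slice counting: '#' is counted in the even-index slice row[::2] and the odd-index slice row[1::2], and the two counts are added to black/white directly or swapped depending on the row parity.
import Mathlib
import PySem

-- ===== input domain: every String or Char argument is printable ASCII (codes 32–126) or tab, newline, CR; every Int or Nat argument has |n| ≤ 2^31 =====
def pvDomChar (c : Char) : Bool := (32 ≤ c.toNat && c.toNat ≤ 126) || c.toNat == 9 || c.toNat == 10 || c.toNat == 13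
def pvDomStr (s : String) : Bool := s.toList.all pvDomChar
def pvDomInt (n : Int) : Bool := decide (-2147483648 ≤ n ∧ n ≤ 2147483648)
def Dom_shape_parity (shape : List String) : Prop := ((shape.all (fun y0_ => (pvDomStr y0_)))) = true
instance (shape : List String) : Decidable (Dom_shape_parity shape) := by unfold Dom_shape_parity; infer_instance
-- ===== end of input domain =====

-- B replaces A's per-cell (x+y)%2 branch by per-row counting of '#' in the even-index
-- and odd-index slices (row[::2], row[1::2]), swapped on odd rows: a simpler per-row decomposition.

-- ===== PORT A =====
def shape_parity (shape : List String) : Int × Int :=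
  (PySem.List.enumerate shape).foldl
    (fun (bw : Int × Int) (yrow : Int × String) =>
      (PySem.List.enumerate yrow.2.toList).foldl
        (fun (bw : Int × Int) (xc : Int × Char) =>
          if xc.2 = '#' then
            if PySem.Int.mod (xc.1 + yrow.1) 2 = 0 then (bw.1 + 1, bw.2)
            else (bw.1, bw.2 + 1)
          else bw)
        bw)
    (0, 0)

-- ===== PORT B =====
def shape_parity_alt (shape : List String) : Int × Int :=
  (PySem.List.enumerate shape).foldl
    (fun (bw : Int × Int) (yrow : Int × String) =>
      let evenHits : Int := (PySem.Str.count ((PySem.Str.slice? yrow.2 none none 2).getD "") "#" : Int)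
      let oddHits : Int := (PySem.Str.count ((PySem.Str.slice? yrow.2 (some 1) none 2).getD "") "#" : Int)
      if PySem.Int.mod yrow.1 2 = 0 then (bw.1 + evenHits, bw.2 + oddHits)
      else (bw.1 + oddHits, bw.2 + evenHits))
    (0, 0)

-- ===== PRECONDITION & SPEC =====
def Spec_shape_parity (shape : List String) (out : Int × Int) : Prop := out = shape_parity_alt shape
instance (shape : List String) (out : Int × Int) : Decidable (Spec_shape_parity shape out) := by unfold Spec_shape_parity; infer_instance

-- ===== CLAIM (what is proved, stated in full; the proofs are below) =====
def Claim_equal_shape_parity : Prop := ∀ (shape : List String), Dom_shape_parity shape → Spec_shape_parity shape (shape_parity shape)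

-- ===== LEMMAS AND PROOFS =====

/-- Elements at even positions (0, 2, 4, …) of a list. -/
def pvEvens {α : Type} : List α → List α
  | [] => []
  | [a] => [a]
  | a :: _ :: t => a :: pvEvens t

theorem pv_evens_cons {α : Type} (c : α) (t : List α) :
    pvEvens (c :: t) = c :: pvEvens t.tail := by
  cases t <;> rfl

theorem pv_filterMap_evens {α : Type} (xs : List α) :
    List.filterMap (fun k : Nat => xs[2 * k]?) (List.range ((xs.length + 1) / 2)) = pvEvens xs := by
  induction xs using pvEvens.induct with
  | case1 => simp [pvEvens]
  | case2 a => simp [pvEvens, List.range_succ]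
  | case3 a b t ih =>
    have hlen : ((a :: b :: t).length + 1) / 2 = (t.length + 1) / 2 + 1 := by
      simp; omega
    rw [hlen, List.range_succ_eq_map, List.filterMap_cons, List.filterMap_map]
    simp only [Nat.mul_zero, List.getElem?_cons_zero]
    have : (fun k : Nat => (a :: b :: t)[2 * (k + 1)]?) = (fun k : Nat => t[2 * k]?) := by
      funext k
      have h2 : 2 * (k + 1) = 2 * k + 2 := by omega
      simp [h2]
    simp only [Function.comp_def, Nat.succ_eq_add_one, this]
    rw [pvEvens]
    simp [ih]

theorem pv_cnt (n : Nat) :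
    (if 0 < n then (((n : Int) + 2 - 1) / 2).toNat else 0) = (n + 1) / 2 := by
  split <;> omega

theorem pv_slice_even {α : Type} (xs : List α) :
    PySem.List.slice? xs none none 2 = some (pvEvens xs) := by
  simp only [PySem.List.slice?, PySem.List.sliceIndices]
  norm_num
  rw [pv_cnt]
  have hfun : (fun k : Nat => xs[((2:Int) * (k:Int)).toNat]?) = (fun k : Nat => xs[2 * k]?) := by
    funext k
    have h2k : ((2:Int) * (k:Int)).toNat = 2 * k := by omega
    rw [h2k]
  rw [hfun, pv_filterMap_evens]

theorem pv_slice_odd {α : Type} (xs : List α) :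
    PySem.List.slice? xs (some 1) none 2 = some (pvEvens xs.tail) := by
  cases xs with
  | nil => rfl
  | cons a t =>
    simp only [PySem.List.slice?, PySem.List.sliceIndices]
    norm_num
    rw [pv_cnt]
    have hfun : (fun k : Nat => (a :: t)[((1:Int) + 2 * (k:Int)).toNat]?) = (fun k : Nat => t[2 * k]?) := by
      funext k
      have h : ((1:Int) + 2 * (k:Int)).toNat = 2 * k + 1 := by omega
      simp [h]
    rw [hfun, pv_filterMap_evens]

theorem pv_count_go (c : Char) (t : List Char) :
    ∀ (fuel acc : Nat), t.length ≤ fuel →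
      PySem.Chars.count.go [c] fuel t acc = acc + t.count c := by
  induction t with
  | nil =>
    intro fuel acc _
    cases fuel <;> simp [PySem.Chars.count.go]
  | cons h0 t ih =>
    intro fuel acc hf
    cases fuel with
    | zero => simp at hf
    | succ f =>
      rw [PySem.Chars.count.go]
      have hpre : List.isPrefixOf [c] (h0 :: t) = (c == h0) := by
        simp [List.isPrefixOf]
      rw [hpre]
      by_cases hc : (c == h0) = true
      · rw [if_pos hc]
        have hd : List.drop [c].length (h0 :: t) = t := by
          simp
        rw [hd, ih f (acc + 1) (by simpa using hf)]
        have h0c : h0 = c := (beq_iff_eq.mp hc).symm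
        simp [h0c]
        omega
      · rw [if_neg hc, ih f acc (by simpa using hf)]
        have hbc : (h0 == c) = false := by
          rw [beq_eq_false_iff_ne]
          intro h
          exact hc (by rw [beq_iff_eq]; exact h.symm)
        simp [List.count_cons, hbc]

theorem pv_count_single (s : List Char) (c : Char) :
    PySem.Chars.count s [c] = s.count c := by
  rw [PySem.Chars.count]
  simp only [List.isEmpty_cons, Bool.false_eq_true, if_false]
  have := pv_count_go c s s.length 0 (le_refl _)
  omega

theorem pv_parity_succ (a : Int) :
    PySem.Int.mod (a + 1) 2 = 0 ↔ ¬ PySem.Int.mod a 2 = 0 := by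
  rw [PySem.Int.mod_eq_emod_of_pos (show (0:Int) < 2 by omega),
      PySem.Int.mod_eq_emod_of_pos (show (0:Int) < 2 by omega)]
  omega

theorem pv_rowA (cs : List Char) (y : Int) :
    ∀ (x0 b w : Int),
      (PySem.List.enumerate cs x0).foldl
        (fun (bw : Int × Int) (xc : Int × Char) =>
          if xc.2 = '#' then
            if PySem.Int.mod (xc.1 + y) 2 = 0 then (bw.1 + 1, bw.2)
            else (bw.1, bw.2 + 1)
          else bw)
        (b, w)
      = if PySem.Int.mod (x0 + y) 2 = 0
        then (b + ((pvEvens cs).count '#' : Int), w + ((pvEvens cs.tail).count '#' : Int))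
        else (b + ((pvEvens cs.tail).count '#' : Int), w + ((pvEvens cs).count '#' : Int)) := by
  induction cs with
  | nil =>
    intro x0 b w
    simp only [PySem.List.enumerate_nil, List.foldl_nil, List.tail_nil, pvEvens, List.count_nil,
      Nat.cast_zero, add_zero, ite_self]
  | cons c t ih =>
    intro x0 b w
    have hpar : PySem.Int.mod (x0 + 1 + y) 2 = 0 ↔ ¬ PySem.Int.mod (x0 + y) 2 = 0 := by
      rw [show x0 + 1 + y = (x0 + y) + 1 by ring]
      exact pv_parity_succ (x0 + y)
    simp only [PySem.List.enumerate_cons, List.foldl_cons]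
    by_cases hp : PySem.Int.mod (x0 + y) 2 = 0
    · have hp1 : ¬ PySem.Int.mod (x0 + 1 + y) 2 = 0 := fun h => (hpar.mp h) hp
      by_cases hc : c = '#'
      · rw [if_pos hc, if_pos hp, ih (x0 + 1), if_neg hp1, if_pos hp]
        simp only [Prod.mk.injEq, pv_evens_cons, List.tail_cons, List.count_cons, hc,
          beq_self_eq_true, if_true]
        constructor <;> push_cast <;> ring
      · rw [if_neg hc, ih (x0 + 1), if_neg hp1, if_pos hp]
        have hbc : (c == '#') = false := beq_eq_false_iff_ne.mpr hc
        simp only [Prod.mk.injEq, pv_evens_cons, List.tail_cons, List.count_cons, hbc,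
          Bool.false_eq_true, if_false]
        constructor <;> push_cast <;> ring
    · have hp1 : PySem.Int.mod (x0 + 1 + y) 2 = 0 := hpar.mpr hp
      by_cases hc : c = '#'
      · rw [if_pos hc, if_neg hp, ih (x0 + 1), if_pos hp1, if_neg hp]
        simp only [Prod.mk.injEq, pv_evens_cons, List.tail_cons, List.count_cons, hc,
          beq_self_eq_true, if_true]
        constructor <;> push_cast <;> ring
      · rw [if_neg hc, ih (x0 + 1), if_pos hp1, if_neg hp]
        have hbc : (c == '#') = false := beq_eq_false_iff_ne.mpr hc
        simp only [Prod.mk.injEq, pv_evens_cons, List.tail_cons, List.count_cons, hbc,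
          Bool.false_eq_true, if_false]
        constructor <;> push_cast <;> ring

theorem pv_count_ofList (l : List Char) :
    PySem.Str.count (String.ofList l) "#" = l.count '#' := by
  rw [PySem.Str.count, String.toList_ofList, show ("#" : String).toList = ['#'] from rfl,
    pv_count_single]

theorem pv_slice_even_str (s : String) :
    (PySem.Str.slice? s none none 2).getD "" = String.ofList (pvEvens s.toList) := by
  rw [PySem.Str.slice?]
  rw [show PySem.Chars.slice? s.toList none none 2 = PySem.List.slice? s.toList none none 2 from
    PySem.Chars.slice?_eq_listSlice? ..]
  rw [pv_slice_even]
  rfl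

theorem pv_slice_odd_str (s : String) :
    (PySem.Str.slice? s (some 1) none 2).getD "" = String.ofList (pvEvens s.toList.tail) := by
  rw [PySem.Str.slice?]
  rw [show PySem.Chars.slice? s.toList (some 1) none 2 = PySem.List.slice? s.toList (some 1) none 2 from
    PySem.Chars.slice?_eq_listSlice? ..]
  rw [pv_slice_odd]
  rfl

-- ===== VERDICT (by name: the statement is the Claim_ definition above) =====
theorem shape_parity_spec : Claim_equal_shape_parity := by
  intro shape _
  unfold Spec_shape_parity shape_parity shape_parity_alt
  apply PySem.List.foldl_congr_mem
  intro acc yrow _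
  obtain ⟨b, w⟩ := acc
  rw [pv_rowA yrow.2.toList yrow.1 0 b w]
  simp only [pv_slice_even_str, pv_slice_odd_str, pv_count_ofList, zero_add]
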